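-- pv_equiv track=rewrite | github.com/netguy204/vibe-engineer | docs/investigations/alphabetical_chunk_grouping/prototypes/h2_naming_comparison.py | cluster_stats
-- ===== SOURCE A (Python) =====
-- def cluster_stats(clusters):
--     """Return stats about cluster distribution."""
--     sizes = [len(v) for v in clusters.values()]
--     singletons = sum(1 for s in sizes if s == 1)
--     superclusters = sum(1 for s in sizes if s > 8)
--     mid_sized = sum(1 for s in sizes if 3 <= s <= 8)
--     return {
--         "total_clusters": len(clusters),
--         "singletons": singletons,
--         "mid_sized_3_8": mid_sized,
--         "superclusters_gt_8": superclusters,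
--         "largest": max(sizes) if sizes else 0,
--     }
-- ===== SOURCE B (Python) =====
-- def cluster_stats(clusters):
--     """Return stats about cluster distribution (single fused pass)."""
--     singletons = mid_sized = superclusters = largest = 0
--     for v in clusters.values():
--         s = len(v)
--         if s == 1:
--             singletons += 1
--         elif s > 8:
--             superclusters += 1
--         elif s >= 3:
--             mid_sized += 1
--         if s > largest:
--             largest = s
--     return {
--         "total_clusters": len(clusters),
--         "singletons": singletons,
--         "mid_sized_3_8": mid_sized,
--         "superclusters_gt_8": superclusters,
--         "largest": largest,
--     }
-- ===== Notes on version B (the rewrite author's own statement) =====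
-- stated objective: simpler
-- what changed: Replaces the materialized sizes list and four separate scans (three generator sums plus max) with one fused loop over clusters.values() maintaining four running accumulators.
import Mathlib
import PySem

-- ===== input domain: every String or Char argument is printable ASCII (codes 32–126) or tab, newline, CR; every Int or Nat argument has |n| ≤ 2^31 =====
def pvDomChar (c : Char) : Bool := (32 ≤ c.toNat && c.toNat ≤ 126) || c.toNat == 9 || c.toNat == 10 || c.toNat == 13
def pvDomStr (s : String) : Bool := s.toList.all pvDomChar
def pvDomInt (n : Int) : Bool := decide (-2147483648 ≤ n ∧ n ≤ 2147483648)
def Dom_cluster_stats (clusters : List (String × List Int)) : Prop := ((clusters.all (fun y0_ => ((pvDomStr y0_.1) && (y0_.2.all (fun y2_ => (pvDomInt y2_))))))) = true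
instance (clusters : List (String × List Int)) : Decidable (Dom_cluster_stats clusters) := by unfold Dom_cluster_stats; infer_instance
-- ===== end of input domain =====

-- B fuses A's four separate scans over a materialized sizes list into one loop with running accumulators (objective: simpler).
-- ===== PORT A =====
def cluster_stats (clusters : List (String × List Int)) : List (String × Int) :=
  let sizes : List Int := clusters.map (fun v => (v.2.length : Int))
  let singletons : Int := sizes.foldl (fun acc s => if s = 1 then acc + 1 else acc) 0
  let superclusters : Int := sizes.foldl (fun acc s => if s > 8 then acc + 1 else acc) 0
  let mid_sized : Int := sizes.foldl (fun acc s => if 3 ≤ s ∧ s ≤ 8 then acc + 1 else acc) 0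
  let largest : Int := if sizes.isEmpty then 0 else (PySem.List.max? sizes (fun y => y)).getD 0
  [("total_clusters", (clusters.length : Int)),
   ("singletons", singletons),
   ("mid_sized_3_8", mid_sized),
   ("superclusters_gt_8", superclusters),
   ("largest", largest)]

-- ===== PORT B =====
def cluster_stats_alt (clusters : List (String × List Int)) : List (String × Int) :=
  let acc := clusters.foldl
    (fun (st : Int × Int × Int × Int) v =>
      let (sg, md, sp, lg) := st
      let s : Int := (v.2.length : Int)
      let (sg, md, sp) :=
        if s = 1 then (sg + 1, md, sp)
        else if s > 8 then (sg, md, sp + 1)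
        else if s ≥ 3 then (sg, md + 1, sp)
        else (sg, md, sp)
      (sg, md, sp, if s > lg then s else lg))
    (0, 0, 0, 0)
  [("total_clusters", (clusters.length : Int)),
   ("singletons", acc.1),
   ("mid_sized_3_8", acc.2.1),
   ("superclusters_gt_8", acc.2.2.1),
   ("largest", acc.2.2.2)]

-- ===== PRECONDITION & SPEC =====
def Spec_cluster_stats (clusters : List (String × List Int)) (out : List (String × Int)) : Prop := out = cluster_stats_alt clusters
instance (clusters : List (String × List Int)) (out : List (String × Int)) : Decidable (Spec_cluster_stats clusters out) := by unfold Spec_cluster_stats; infer_instance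

-- ===== CLAIM (what is proved, stated in full; the proofs are below) =====
def Claim_equal_cluster_stats : Prop := ∀ (clusters : List (String × List Int)), Dom_cluster_stats clusters → Spec_cluster_stats clusters (cluster_stats clusters)

-- ===== LEMMAS AND PROOFS =====

theorem pv_loop_eq (clusters : List (String × List Int)) (sg md sp lg : Int) :
    clusters.foldl
      (fun (st : Int × Int × Int × Int) v =>
        let (sg, md, sp, lg) := st
        let s : Int := (v.2.length : Int)
        let (sg, md, sp) :=
          if s = 1 then (sg + 1, md, sp)
          else if s > 8 then (sg, md, sp + 1)
          else if s ≥ 3 then (sg, md + 1, sp)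
          else (sg, md, sp)
        (sg, md, sp, if s > lg then s else lg))
      (sg, md, sp, lg)
    = ((clusters.map (fun v => (v.2.length : Int))).foldl (fun acc s => if s = 1 then acc + 1 else acc) sg,
       (clusters.map (fun v => (v.2.length : Int))).foldl (fun acc s => if 3 ≤ s ∧ s ≤ 8 then acc + 1 else acc) md,
       (clusters.map (fun v => (v.2.length : Int))).foldl (fun acc s => if s > 8 then acc + 1 else acc) sp,
       (clusters.map (fun v => (v.2.length : Int))).foldl max lg) := by
  induction clusters generalizing sg md sp lg with
  | nil => simp
  | cons h t ih =>
    simp only [List.foldl_cons, List.map_cons]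
    rw [ih]
    have hmax : (if ((h.2.length : Int)) > lg then ((h.2.length : Int)) else lg)
        = max lg ((h.2.length : Int)) := by
      by_cases hlt : ((h.2.length : Int)) > lg
      · rw [if_pos hlt, max_eq_right hlt.le]
      · rw [if_neg hlt, max_eq_left (by omega)]
    rw [hmax]
    split_ifs <;> simp_all <;> omega

theorem pv_max_eq (sizes : List Int) (hnn : ∀ s ∈ sizes, 0 ≤ s) :
    (if sizes.isEmpty then 0 else (PySem.List.max? sizes (fun y => y)).getD 0)
      = sizes.foldl max 0 := by
  cases sizes with
  | nil => simp
  | cons x t =>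
    have hx : (0 : Int) ≤ x := hnn x (by simp)
    simp [PySem.List.max?_id_cons, List.foldl_cons, max_eq_right hx]

-- ===== VERDICT (by name: the statement is the Claim_ definition above) =====
theorem cluster_stats_spec : Claim_equal_cluster_stats := by
  intro clusters _
  unfold Spec_cluster_stats cluster_stats cluster_stats_alt
  rw [pv_loop_eq]
  have h := pv_max_eq (clusters.map fun v => ((v.2.length : Int))) (by
    intro s hs; simp only [List.mem_map] at hs; obtain ⟨v, _, rfl⟩ := hs; positivity)
  simp only [h]
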